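-- pv_equiv track=rewrite | github.com/Zersya/Q-Learning | main.py | state2Pos
-- ===== SOURCE A (Python) =====
-- def state2Pos(state, lenQtable):
--     _pos = [0,1]
--     for i in range(lenQtable):
--         if(i == state):
--             return _pos
--         else:
--             if(i != 0):
--                 if(_pos[1] == 14):
--                     _pos[0] += 1
--                     _pos[1] = 0
--                 else:
--                     _pos[1] += 1
-- ===== SOURCE B (Python) =====
-- def state2Pos(state, lenQtable):
--     # Closed-form: A's walking position at index `state` is linear cell
--     # max(1, state) in a 15-wide grid (index 0 never advances the walker).
--     if 0 <= state < lenQtable: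
--         lin = state if state >= 1 else 1
--         return [lin // 15, lin % 15]
--     return None
-- ===== Notes on version B (the rewrite author's own statement) =====
-- stated objective: faster
-- what changed: Replaces A's O(state) step-by-step grid walk over range(lenQtable) with a closed-form divmod on max(1,state).
-- outside the precondition, e.g. on state2Pos(5, 3): A returns None, B returns None
import Mathlib
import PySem

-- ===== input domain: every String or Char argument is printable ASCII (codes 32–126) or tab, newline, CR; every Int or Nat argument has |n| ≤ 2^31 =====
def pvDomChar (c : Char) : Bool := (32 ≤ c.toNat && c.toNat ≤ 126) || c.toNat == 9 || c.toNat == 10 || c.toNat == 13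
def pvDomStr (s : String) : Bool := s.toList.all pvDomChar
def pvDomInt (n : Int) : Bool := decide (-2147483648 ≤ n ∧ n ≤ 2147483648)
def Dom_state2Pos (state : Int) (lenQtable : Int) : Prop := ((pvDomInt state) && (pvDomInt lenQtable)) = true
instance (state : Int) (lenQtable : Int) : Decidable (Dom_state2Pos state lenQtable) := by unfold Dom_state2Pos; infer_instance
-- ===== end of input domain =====

-- B replaces A's step-by-step grid walk by a closed-form divmod (O(1) vs O(state)).

-- ===== PORT A =====
-- the for-loop over range(lenQtable) with early return, as a counter recursion
-- (Python's range is lazy); the fall-through (Python's implicit None, excluded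
-- by Pre_) is rendered as []
-- fuel = number of remaining loop iterations, (lenQtable - i).toNat
def state2PosGo (state : Int) : Nat → Int → Int → Int → List Int
  | 0, _, _, _ => []
  | fuel + 1, i, r, c =>
    if i = state then [r, c]
    else if i ≠ 0 then
      if c = 14 then state2PosGo state fuel (i + 1) (r + 1) 0
      else state2PosGo state fuel (i + 1) r (c + 1)
    else state2PosGo state fuel (i + 1) r c

def state2Pos (state : Int) (lenQtable : Int) : List Int :=
  state2PosGo state lenQtable.toNat 0 0 1

-- ===== PORT B =====
-- the out-of-range branch (Python's None, excluded by Pre_) is rendered as []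
def state2Pos_alt (state : Int) (lenQtable : Int) : List Int :=
  if 0 ≤ state ∧ state < lenQtable then
    let lin := if 1 ≤ state then state else 1
    [PySem.Int.floordiv lin 15, PySem.Int.mod lin 15]
  else []

-- ===== PRECONDITION & SPEC =====
-- Pre_ excludes exactly the inputs (state < 0 or state ≥ lenQtable) on which the Python A
-- falls through its loop and returns None, which is not a value of the declared list type.
def Pre_state2Pos (state : Int) (lenQtable : Int) : Prop := 0 ≤ state ∧ state < lenQtable
instance (state : Int) (lenQtable : Int) : Decidable (Pre_state2Pos state lenQtable) := by unfold Pre_state2Pos; infer_instance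
def pvWitness_state2Pos : Int × Int := (17, 40)

def Spec_state2Pos (state : Int) (lenQtable : Int) (out : List Int) : Prop := out = state2Pos_alt state lenQtable
instance (state : Int) (lenQtable : Int) (out : List Int) : Decidable (Spec_state2Pos state lenQtable out) := by unfold Spec_state2Pos; infer_instance

-- ===== CLAIM (what is proved, stated in full; the proofs are below) =====
def Claim_equal_state2Pos : Prop := ∀ (state : Int) (lenQtable : Int), Dom_state2Pos state lenQtable → Pre_state2Pos state lenQtable → Spec_state2Pos state lenQtable (state2Pos state lenQtable)

-- ===== LEMMAS AND PROOFS =====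

-- invariant: entering iteration i (1 ≤ i ≤ state < n), the walker sits at cell i of the 15-wide grid
theorem state2PosGo_inv (state : Int) : ∀ (i n : Int), 1 ≤ i → i ≤ state → state < n →
    state2PosGo state (n - i).toNat i (PySem.Int.floordiv i 15) (PySem.Int.mod i 15)
      = [PySem.Int.floordiv state 15, PySem.Int.mod state 15] := by
  intro i n h1 h2 h3
  have hfuel : (state - i).toNat < (state - i).toNat + 1 := Nat.lt_succ_self _
  generalize hk : (state - i).toNat = k at *
  clear hfuel
  induction k generalizing i with
  | zero =>
    have hi : i = state := by omega
    rw [show (n - i).toNat = (n - (i + 1)).toNat + 1 by omega]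
    rw [state2PosGo, if_pos hi, hi]
  | succ k ih =>
    have hlt : i < state := by omega
    rw [show (n - i).toNat = (n - (i + 1)).toNat + 1 by omega]
    rw [state2PosGo]
    have hne : i ≠ state := by omega
    have hne0 : i ≠ 0 := by omega
    have hd : PySem.Int.floordiv i 15 = i / 15 := PySem.Int.floordiv_eq_ediv_of_pos (by omega)
    have hm : PySem.Int.mod i 15 = i % 15 := PySem.Int.mod_eq_emod_of_pos (by omega)
    have hd' : PySem.Int.floordiv (i + 1) 15 = (i + 1) / 15 := PySem.Int.floordiv_eq_ediv_of_pos (by omega)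
    have hm' : PySem.Int.mod (i + 1) 15 = (i + 1) % 15 := PySem.Int.mod_eq_emod_of_pos (by omega)
    by_cases h14 : PySem.Int.mod i 15 = 14
    · have e1 : PySem.Int.floordiv i 15 + 1 = PySem.Int.floordiv (i + 1) 15 := by
        rw [hd, hd']; omega
      have e2 : (0 : Int) = PySem.Int.mod (i + 1) 15 := by
        rw [hm']; omega
      rw [if_neg hne, if_pos hne0, if_pos h14, e1, e2]
      exact ih (i + 1) (by omega) (by omega) (by omega)
    · have e1 : PySem.Int.mod i 15 + 1 = PySem.Int.mod (i + 1) 15 := by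
        rw [hm, hm']; omega
      have e0 : PySem.Int.floordiv i 15 = PySem.Int.floordiv (i + 1) 15 := by
        rw [hd, hd']; omega
      rw [if_neg hne, if_pos hne0, if_neg h14, e1, e0]
      exact ih (i + 1) (by omega) (by omega) (by omega)

-- ===== VERDICT (by name: the statement is the Claim_ definition above) =====
theorem state2Pos_spec : Claim_equal_state2Pos := by
  intro state n _ hpre
  obtain ⟨h0, hlt⟩ := hpre
  unfold Spec_state2Pos state2Pos state2Pos_alt
  rw [if_pos ⟨h0, hlt⟩]
  rw [show n.toNat = (n - 1).toNat + 1 by omega, state2PosGo]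
  by_cases hs : state = 0
  · subst hs
    norm_num
  · have h1 : 1 ≤ state := by omega
    rw [if_neg (by omega : (0:Int) ≠ state), if_neg (by omega : ¬ ((0:Int) ≠ 0))]
    have := state2PosGo_inv state 1 n (by omega) h1 hlt
    simpa [h1, show ((n : Int) - 1).toNat = (n - 1).toNat from rfl] using this
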